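-- pv_equiv track=rewrite | github.com/dustinong44/functions | issuper_function/swap_case/swap_case.py | is_upper_custom
-- ===== SOURCE A (Python) =====
-- def is_upper_custom(s):
--     #define function that checks if all of the chracters are in uppercase
--     has_alpha = False
--
--     for char in s:
--         if 'a' <= char <= 'z':
--             return False
--         if 'A' <= char <= 'Z':  # both condition checks for the casing of the character
--             has_alpha = True
--
--     return has_alpha
-- ===== SOURCE B (Python) =====
-- def is_upper_custom(s):
--     # Two independent predicate scans combined by boolean logic,
--     # instead of one fused early-return loop. Strict ASCII ranges only.
--     has_upper = any('A' <= c <= 'Z' for c in s)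
--     has_lower = any('a' <= c <= 'z' for c in s)
--     return has_upper and not has_lower
-- ===== Notes on version B (the rewrite author's own statement) =====
-- stated objective: idiomatic
-- what changed: Replaces the single early-return loop carrying a has_alpha flag with two independent any() existence scans (has_upper, has_lower) combined as has_upper and not has_lower.
import Mathlib
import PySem

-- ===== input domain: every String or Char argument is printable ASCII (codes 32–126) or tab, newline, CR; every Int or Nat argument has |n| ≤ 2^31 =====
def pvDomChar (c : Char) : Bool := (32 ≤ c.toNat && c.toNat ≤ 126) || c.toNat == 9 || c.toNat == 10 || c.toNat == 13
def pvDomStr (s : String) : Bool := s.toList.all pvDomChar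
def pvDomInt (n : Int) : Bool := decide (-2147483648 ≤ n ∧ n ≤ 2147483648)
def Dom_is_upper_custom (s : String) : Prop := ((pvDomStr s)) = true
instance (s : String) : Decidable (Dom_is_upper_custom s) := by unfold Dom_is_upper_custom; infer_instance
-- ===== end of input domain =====

-- B replaces A's single early-return loop with two independent existence scans; same values (idiomatic).
-- ===== PORT A =====
-- the for-loop with early return and the has_alpha accumulator, as structural recursion
def isUpperLoopA : List Char → Bool → Bool
  | [], has_alpha => has_alpha
  | c :: rest, has_alpha =>
      if 'a' ≤ c ∧ c ≤ 'z' then false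
      else if 'A' ≤ c ∧ c ≤ 'Z' then isUpperLoopA rest true
      else isUpperLoopA rest has_alpha

def is_upper_custom (s : String) : Bool := isUpperLoopA s.toList false

-- ===== PORT B =====
def is_upper_custom_alt (s : String) : Bool :=
  let has_upper := s.toList.any (fun c => decide ('A' ≤ c ∧ c ≤ 'Z'))
  let has_lower := s.toList.any (fun c => decide ('a' ≤ c ∧ c ≤ 'z'))
  has_upper && !has_lower

-- ===== PRECONDITION & SPEC =====
def Spec_is_upper_custom (s : String) (out : Bool) : Prop := out = is_upper_custom_alt s
instance (s : String) (out : Bool) : Decidable (Spec_is_upper_custom s out) := by unfold Spec_is_upper_custom; infer_instance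

-- ===== CLAIM (what is proved, stated in full; the proofs are below) =====
def Claim_equal_is_upper_custom : Prop := ∀ (s : String), Dom_is_upper_custom s → Spec_is_upper_custom s (is_upper_custom s)

-- ===== LEMMAS AND PROOFS =====

-- ===== VERDICT (by name: the statement is the Claim_ definition above) =====
-- loop invariant: A's loop equals (upper seen so far or upper ahead) and no lowercase ahead
theorem isUpperLoopA_eq (l : List Char) (acc : Bool) :
    isUpperLoopA l acc =
      ((l.any (fun c => decide ('A' ≤ c ∧ c ≤ 'Z')) || acc) &&
       !(l.any (fun c => decide ('a' ≤ c ∧ c ≤ 'z')))) := by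
  induction l generalizing acc with
  | nil => simp [isUpperLoopA]
  | cons c rest ih =>
      simp only [isUpperLoopA, List.any_cons]
      split_ifs with h1 h2 <;> simp [*]

theorem is_upper_custom_spec : Claim_equal_is_upper_custom := by
  intro s _
  unfold Spec_is_upper_custom is_upper_custom is_upper_custom_alt
  simp [isUpperLoopA_eq]
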